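-- pv_equiv track=rewrite | github.com/yoshitaka-k/mahjong | pkgs/haipai.py | __check_kotu
-- ===== SOURCE A (Python) =====
-- def __check_kotu(split_hai):
--     cnt = 0
--     hai = ''
--     kotu_cnt = 0
--
--     for i in split_hai:
--         for j in i:
--             if hai == j:
--                 cnt = cnt + 1
--             else:
--                 cnt = 0
--
--             if cnt > 2:
--                 kotu_cnt = kotu_cnt + 1
--             hai = j
--     return kotu_cnt
-- ===== SOURCE B (Python) =====
-- from itertools import groupby
--
--
-- def __check_kotu(split_hai):
--     flat = [j for i in split_hai for j in i]
--     return sum(max(0, len(list(g)) - 3) for _, g in groupby(flat))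
-- ===== Notes on version B (the rewrite author's own statement) =====
-- stated objective: idiomatic
-- what changed: Replaces the stateful running-counter loop (cnt/hai/kotu_cnt) by flattening the tiles and grouping them into maximal runs with itertools.groupby, adding the closed form max(0, L-3) per run of length L.
-- intended difference: On inputs whose flattened tile stream starts with at least three empty strings, A's initial sentinel hai='' merges the leading run of '' with itself and A returns one more than the intended count (e.g. [['','','']] gives A=1), while B returns the per-run count max(0,L-3) (0 there), which is the intended value since the sentinel match is an implementation accident. — e.g. on __check_kotu([["", "", ""]]): A returns 1, B returns 0
import Mathlib
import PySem

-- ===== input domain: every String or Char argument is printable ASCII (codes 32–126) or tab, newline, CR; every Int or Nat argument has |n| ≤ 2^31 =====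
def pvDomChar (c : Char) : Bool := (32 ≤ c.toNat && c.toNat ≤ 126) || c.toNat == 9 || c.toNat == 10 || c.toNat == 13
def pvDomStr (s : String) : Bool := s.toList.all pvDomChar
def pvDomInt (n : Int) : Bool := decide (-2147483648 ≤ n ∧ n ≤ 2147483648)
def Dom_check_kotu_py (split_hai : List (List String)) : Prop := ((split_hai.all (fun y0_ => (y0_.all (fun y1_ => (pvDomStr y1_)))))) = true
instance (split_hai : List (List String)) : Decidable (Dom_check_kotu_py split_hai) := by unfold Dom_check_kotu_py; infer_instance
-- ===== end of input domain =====

-- B replaces A's stateful running-counter loop by grouping the flattened tiles into maximal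
-- runs and adding max(0, L-3) per run (idiomatic; same cost).

-- ===== PORT A =====
-- one iteration of A's inner loop body on the state (cnt, hai, kotu_cnt)
def stepA (st : Int × String × Int) (j : String) : Int × String × Int :=
  let cnt := if st.2.1 == j then st.1 + 1 else (0 : Int)
  let kotu := if cnt > 2 then st.2.2 + 1 else st.2.2
  (cnt, j, kotu)

def check_kotu_py (split_hai : List (List String)) : Int :=
  (split_hai.foldl (fun st i => i.foldl stepA st) (0, "", 0)).2.2

-- ===== PORT B =====
-- port of itertools.groupby: sum max(0, L-3) over maximal runs of equal elements
def runsSum : List String → Int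
  | [] => 0
  | x :: xs =>
    max 0 ((1 + ((xs.takeWhile (· == x)).length : Int)) - 3) + runsSum (xs.dropWhile (· == x))
termination_by l => l.length
decreasing_by
  simpa using Nat.lt_succ_of_le (List.length_dropWhile_le _ _)

def check_kotu_py_alt (split_hai : List (List String)) : Int :=
  runsSum (split_hai.flatMap id)

-- ===== PRECONDITION & SPEC =====
-- On inputs whose flattened tile stream begins with at least three empty strings, A's initial
-- sentinel hai = '' matches the leading '' tiles and A returns one more than the intended
-- per-run count; B returns max(0, L-3) for that run, the intended value.
def D_check_kotu_py (split_hai : List (List String)) : Prop :=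
  (split_hai.flatMap id).take 3 = ["", "", ""]
instance (split_hai : List (List String)) : Decidable (D_check_kotu_py split_hai) := by
  unfold D_check_kotu_py; infer_instance

def Spec_check_kotu_py (split_hai : List (List String)) (out : Int) : Prop :=
  ¬ D_check_kotu_py split_hai → out = check_kotu_py_alt split_hai
instance (split_hai : List (List String)) (out : Int) : Decidable (Spec_check_kotu_py split_hai out) := by
  unfold Spec_check_kotu_py; infer_instance

def pvDiffWitness_check_kotu_py : List (List String) := [["", "", ""]]
def pvDiffWitnessOut_check_kotu_py : Int × Int := (1, 0)

-- ===== CLAIM (what is proved, stated in full; the proofs are below) =====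
def Claim_unchanged_check_kotu_py : Prop := ∀ (split_hai : List (List String)), Dom_check_kotu_py split_hai → Spec_check_kotu_py split_hai (check_kotu_py split_hai)
def Claim_changed_check_kotu_py : Prop := Dom_check_kotu_py (pvDiffWitness_check_kotu_py) ∧ D_check_kotu_py (pvDiffWitness_check_kotu_py) ∧ check_kotu_py (pvDiffWitness_check_kotu_py) = pvDiffWitnessOut_check_kotu_py.1 ∧ check_kotu_py_alt (pvDiffWitness_check_kotu_py) = pvDiffWitnessOut_check_kotu_py.2 ∧ pvDiffWitnessOut_check_kotu_py.1 ≠ pvDiffWitnessOut_check_kotu_py.2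
def Claim_exact_check_kotu_py : Prop := ∀ (split_hai : List (List String)), Dom_check_kotu_py split_hai → D_check_kotu_py split_hai → check_kotu_py split_hai ≠ check_kotu_py_alt split_hai

-- ===== LEMMAS AND PROOFS =====

-- A's double loop is the fold of stepA over the flattened list
theorem foldl_flatten (split_hai : List (List String)) (s : Int × String × Int) :
    split_hai.foldl (fun st i => i.foldl stepA st) s = (split_hai.flatMap id).foldl stepA s := by
  induction split_hai generalizing s with
  | nil => rfl
  | cons i is ih => simp [List.flatMap_cons, List.foldl_append, ih]

-- folding stepA over a run of copies of x, starting with hai = x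
theorem foldl_run (run : List String) (x : String) (c k : Int)
    (hrun : ∀ y ∈ run, y = x) :
    run.foldl stepA (c, x, k) =
      (c + run.length, x, k + (max 0 (c + run.length - 2) - max 0 (c - 2))) := by
  induction run generalizing c k with
  | nil => simp
  | cons y ys ih =>
    have hy : y = x := hrun y (by simp)
    subst hy
    have hys : ∀ z ∈ ys, z = y := fun z hz => hrun z (by simp [hz])
    simp only [List.foldl_cons, stepA, beq_self_eq_true, if_true]
    rw [ih _ _ hys]
    refine Prod.ext ?_ (Prod.ext rfl ?_)
    · simp only [List.length_cons]; push_cast; ring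
    · simp only [List.length_cons]
      split_ifs with h <;> push_cast <;> omega

-- the head of dropWhile fails the predicate
theorem head_dropWhile_ne {p : String → Bool} {l : List String} {y : String}
    (h : (l.dropWhile p).head? = some y) : p y = false := by
  induction l with
  | nil => simp [List.dropWhile] at h
  | cons a as ih =>
    by_cases ha : p a
    · rw [List.dropWhile_cons_of_pos ha] at h; exact ih h
    · rw [List.dropWhile_cons_of_neg ha] at h
      simp at h
      simpa [← h] using ha

-- main invariant: if the head of l differs from the stored hai, the fold adds runsSum l
theorem foldl_main (l : List String) (c k : Int) (h : String)
    (hne : ∀ x, l.head? = some x → x ≠ h) :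
    (l.foldl stepA (c, h, k)).2.2 = k + runsSum l := by
  induction hn : l.length using Nat.strong_induction_on generalizing l c k h with
  | _ n ih =>
  match l with
  | [] => simp [runsSum]
  | x :: xs =>
    have hx : x ≠ h := hne x rfl
    have hbeq : (h == x) = false := by simp [Ne.symm hx]
    have hsplit : xs = xs.takeWhile (· == x) ++ xs.dropWhile (· == x) :=
      (List.takeWhile_append_dropWhile).symm
    have hmem : ∀ y ∈ xs.takeWhile (· == x), y = x := by
      intro y hy
      have := List.mem_takeWhile_imp hy
      simpa using this
    have hstep : stepA (c, h, k) x = (0, x, k) := by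
      simp [stepA, hbeq]
    rw [List.foldl_cons, hstep]
    conv_lhs => rw [hsplit]
    rw [List.foldl_append, foldl_run _ _ _ _ hmem]
    have hlen : (xs.dropWhile (· == x)).length < n := by
      have h1 := List.length_dropWhile_le (· == x) xs
      simp [← hn]; omega
    rw [ih _ hlen _ _ _ _ (fun y hy => by
          have := head_dropWhile_ne hy
          intro he; subst he; simp at this) rfl]
    rw [runsSum]
    push_cast
    omega

-- full characterisation of A's result via the leading run of empty strings
theorem A_char (flat : List String) :
    (flat.foldl stepA (0, "", 0)).2.2 =
      max 0 (((flat.takeWhile (· == "")).length : Int) - 2) +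
        runsSum (flat.dropWhile (· == "")) := by
  have hsplit : flat = flat.takeWhile (· == "") ++ flat.dropWhile (· == "") :=
    (List.takeWhile_append_dropWhile).symm
  have hmem : ∀ y ∈ flat.takeWhile (· == ""), y = "" := by
    intro y hy
    have := List.mem_takeWhile_imp hy
    simpa using this
  conv_lhs => rw [hsplit]
  rw [List.foldl_append, foldl_run _ _ _ _ hmem]
  rw [foldl_main _ _ _ _ (fun y hy => by
        have := head_dropWhile_ne hy
        intro he; subst he; simp at this)]
  omega

-- full characterisation of B's result via the leading run of empty strings
theorem B_char (flat : List String) (hne : flat ≠ []) (hhd : flat.head? = some "") :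
    runsSum flat =
      max 0 (((flat.takeWhile (· == "")).length : Int) - 3) +
        runsSum (flat.dropWhile (· == "")) := by
  match flat with
  | [] => exact absurd rfl hne
  | x :: xs =>
    have hx : x = "" := by simpa using hhd
    subst hx
    rw [runsSum]
    rw [List.takeWhile_cons_of_pos (by simp), List.dropWhile_cons_of_pos (by simp)]
    simp only [List.length_cons]
    push_cast
    omega

-- the leading run of "" has length ≥ 3 iff the first three elements are all ""
theorem take3_iff (flat : List String) :
    flat.take 3 = ["", "", ""] ↔ 3 ≤ (flat.takeWhile (· == "")).length := by
  match flat with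
  | [] => simp
  | [a] =>
    constructor
    · intro h; simp at h
    · intro h
      by_cases ha : (a == "") = true
      · rw [List.takeWhile_cons_of_pos (p := fun x => x == "") ha] at h; simp at h
      · rw [List.takeWhile_cons_of_neg (p := fun x => x == "") ha] at h; simp at h
  | [a, b] =>
    constructor
    · intro h; simp at h
    · intro h
      by_cases ha : (a == "") = true
      · rw [List.takeWhile_cons_of_pos (p := fun x => x == "") ha] at h
        by_cases hb : (b == "") = true
        · rw [List.takeWhile_cons_of_pos (p := fun x => x == "") hb] at h; simp at h
        · rw [List.takeWhile_cons_of_neg (p := fun x => x == "") hb] at h; simp at h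
      · rw [List.takeWhile_cons_of_neg (p := fun x => x == "") ha] at h; simp at h
  | a :: b :: c :: t =>
    constructor
    · intro h
      simp at h
      obtain ⟨ha, hb, hc⟩ := h
      subst ha; subst hb; subst hc
      rw [List.takeWhile_cons_of_pos (by simp), List.takeWhile_cons_of_pos (by simp),
          List.takeWhile_cons_of_pos (by simp)]
      simp
    · intro h
      by_cases ha : (a == "") = true
      · rw [List.takeWhile_cons_of_pos (p := fun x => x == "") ha] at h
        by_cases hb : (b == "") = true
        · rw [List.takeWhile_cons_of_pos (p := fun x => x == "") hb] at h
          by_cases hc : (c == "") = true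
          · have ha' : a = "" := by simpa using ha
            have hb' : b = "" := by simpa using hb
            have hc' : c = "" := by simpa using hc
            subst ha'; subst hb'; subst hc'; rfl
          · rw [List.takeWhile_cons_of_neg (p := fun x => x == "") hc] at h; simp at h
        · rw [List.takeWhile_cons_of_neg (p := fun x => x == "") hb] at h; simp at h
      · rw [List.takeWhile_cons_of_neg (p := fun x => x == "") ha] at h; simp at h

-- A − B depending on the leading-run length
theorem AB_diff (flat : List String) :
    (flat.foldl stepA (0, "", 0)).2.2 =
      runsSum flat + (if 3 ≤ (flat.takeWhile (· == "")).length then 1 else 0) := by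
  rw [A_char]
  by_cases hhd : flat.head? = some ""
  · have hne : flat ≠ [] := by intro h; subst h; simp at hhd
    rw [B_char flat hne hhd]
    have hpos : 1 ≤ (flat.takeWhile (· == "")).length := by
      match flat with
      | [] => simp at hhd
      | x :: xs =>
        have hx : x = "" := by simpa using hhd
        subst hx
        rw [List.takeWhile_cons_of_pos (by simp)]
        simp
    split_ifs with h3 <;> omega
  · have htw : flat.takeWhile (· == "") = [] := by
      match flat with
      | [] => rfl
      | x :: xs =>
        have hx : (x == "") = false := by
          rcases h : (x == "") with _ | _
          · rfl
          · exfalso; simp at h; subst h; simp at hhd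
        exact List.takeWhile_cons_of_neg (by simp [hx])
    have hdw : flat.dropWhile (· == "") = flat := by
      match flat with
      | [] => rfl
      | x :: xs =>
        have hx : (x == "") = false := by
          rcases h : (x == "") with _ | _
          · rfl
          · exfalso; simp at h; subst h; simp at hhd
        exact List.dropWhile_cons_of_neg (by simp [hx])
    rw [htw, hdw]
    simp

-- ===== VERDICT (by name: the statement is the Claim_ definition above) =====
theorem check_kotu_py_spec : Claim_unchanged_check_kotu_py := by
  intro split_hai _ hD
  unfold check_kotu_py check_kotu_py_alt
  rw [foldl_flatten, AB_diff]
  have hlt : ¬ 3 ≤ ((split_hai.flatMap id).takeWhile (· == "")).length := by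
    rw [← take3_iff]; exact hD
  rw [if_neg hlt, add_zero]

theorem check_kotu_py_changed : Claim_changed_check_kotu_py := by
  unfold Claim_changed_check_kotu_py
  refine ⟨by decide, by decide, by decide, ?_, by decide⟩
  show check_kotu_py_alt [["", "", ""]] = 0
  simp [check_kotu_py_alt, runsSum, List.takeWhile, List.dropWhile]

theorem check_kotu_py_tight : Claim_exact_check_kotu_py := by
  intro split_hai _ hD
  unfold check_kotu_py check_kotu_py_alt D_check_kotu_py at *
  rw [foldl_flatten, AB_diff]
  have hge : 3 ≤ ((split_hai.flatMap id).takeWhile (· == "")).length := by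
    rw [← take3_iff]; exact hD
  rw [if_pos hge]
  omega
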